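-- pv_equiv track=rewrite | github.com/alpparkan/leetcode | python/1162-as-far-from-land-as-possible.py | maxDistance_reverted
-- ===== SOURCE A (Python) =====
-- from collections import deque
-- from typing import List
--
-- def maxDistance_reverted(grid: List[List[int]]) -> int:
--     q = deque()
--     for r in range(len(grid)):
--         for c in range(len(grid[0])):
--             if grid[r][c] == 1:
--                 q.append((r, c))
--
--     res = -1
--     if len(q) == len(grid) * len(grid[0]) or len(q) == 0:
--         return -1
--     directions = [[1, 0], [-1, 0], [0, 1], [0, -1]]
--     while q:
--         for _ in range(len(q)):
--             r, c = q.popleft()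
--             for dir in directions:
--                 row = r + dir[0]
--                 col = c + dir[1]
--                 if (row not in range(len(grid)) or col not in range(len(grid[0]))
--                     or grid[row][col] == 1):
--                     continue
--                 q.append((row, col))
--                 grid[row][col] = 1
--         res += 1
--
--     return res
-- ===== SOURCE B (Python) =====
-- def maxDistance_reverted(grid):
--     rows, cols = len(grid), len(grid[0])
--     land = [(r, c) for r in range(rows) for c in range(cols) if grid[r][c] == 1]
--     if len(land) == 0 or len(land) == rows * cols:
--         return -1
--     return max(
--         min(abs(r - lr) + abs(c - lc) for lr, lc in land)
--         for r in range(rows) for c in range(cols) if grid[r][c] != 1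
--     )
-- ===== Notes on version B (the rewrite author's own statement) =====
-- stated objective: simpler
-- what changed: A's multi-source BFS with a queue, level counting and in-place marking of grid cells is replaced by a direct computation: max over water cells of the min Manhattan distance to any land cell (valid because the grid graph is a full rectangle, so BFS distance equals Manhattan distance); B does not mutate grid, so equivalence is about the return value only.
import Mathlib
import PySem

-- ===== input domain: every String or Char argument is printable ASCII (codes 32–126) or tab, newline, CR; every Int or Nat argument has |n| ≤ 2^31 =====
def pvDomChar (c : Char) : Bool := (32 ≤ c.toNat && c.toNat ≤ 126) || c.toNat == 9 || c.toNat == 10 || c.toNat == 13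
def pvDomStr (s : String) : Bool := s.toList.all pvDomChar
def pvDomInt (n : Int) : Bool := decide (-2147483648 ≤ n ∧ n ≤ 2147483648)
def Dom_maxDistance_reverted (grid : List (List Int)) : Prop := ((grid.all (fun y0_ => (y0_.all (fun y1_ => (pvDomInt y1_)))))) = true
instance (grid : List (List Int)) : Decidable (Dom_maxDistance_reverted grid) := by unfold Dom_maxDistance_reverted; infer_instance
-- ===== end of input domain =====

-- B replaces A's multi-source BFS (which mutates `grid`) by a direct max-over-water of
-- min-over-land Manhattan distances; equivalence is about the RETURN value only (A
-- overwrites water cells of `grid` with 1, B leaves `grid` untouched).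

-- ===== PORT A =====
-- grid[r][c] == 1 (false if out of range; A only queries in-range cells on Pre_ inputs)
def pvCell1 (g : List (List Int)) (r c : Int) : Bool :=
  match PySem.List.pyGet? g r with
  | some row => PySem.List.pyGet? row c == some (1 : Int)
  | none => false

-- grid[r][c] = 1 (in-place write; identity if out of range)
def pvSet1 (g : List (List Int)) (r c : Int) : List (List Int) :=
  match PySem.List.pyGet? g r with
  | some row => g.set r.toNat (row.set c.toNat 1)
  | none => g

-- the initial queue: (r, c) for r in range(len(grid)) for c in range(len(grid[0])) if grid[r][c] == 1
def pvLandList (g : List (List Int)) (R C : Int) : List (Int × Int) :=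
  (PySem.List.pyRange 0 R 1).flatMap (fun r =>
    (PySem.List.pyRange 0 C 1).filterMap (fun c =>
      if pvCell1 g r c then some (r, c) else none))

-- one direction of the inner 'for dir in directions' body for the popped cell (r, c)
def pvStep (R C r c : Int) (st : List (List Int) × List (Int × Int)) (d : Int × Int) :
    List (List Int) × List (Int × Int) :=
  let row := r + d.1
  let col := c + d.2
  if ¬(0 ≤ row ∧ row < R) ∨ ¬(0 ≤ col ∧ col < C) ∨ pvCell1 st.1 row col then st
  else (pvSet1 st.1 row col, st.2 ++ [(row, col)])

-- the four directions for one popped cell (r, c)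
def pvVisit (R C r c : Int) (st : List (List Int) × List (Int × Int)) :
    List (List Int) × List (Int × Int) :=
  ([((1:Int),(0:Int)), (-1,0), (0,1), (0,-1)]).foldl (pvStep R C r c) st

-- 'for _ in range(len(q)): r, c = q.popleft(); …' — one BFS level
def pvLevel (R C : Int) : List (Int × Int) → List (List Int) × List (Int × Int) →
    List (List Int) × List (Int × Int)
  | [], st => st
  | (r, c) :: rest, st => pvLevel R C rest (pvVisit R C r c st)

-- 'while q: …; res += 1' with fuel (fuel = #cells + 1 always suffices, proved below)
def pvLoop (R C : Int) : Nat → List (List Int) → List (Int × Int) → Int → Int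
  | 0, _, _, res => res
  | fuel+1, g, q, res =>
    match q with
    | [] => res
    | _ :: _ =>
      let st := pvLevel R C q (g, [])
      pvLoop R C fuel st.1 st.2 (res + 1)

def maxDistance_reverted (grid : List (List Int)) : Int :=
  let R : Int := grid.length
  let C : Int := (grid.headD []).length
  let q := pvLandList grid R C
  if (q.length : Int) = R * C ∨ q.length = 0 then -1
  else pvLoop R C (grid.length * (grid.headD []).length + 1) grid q (-1)

-- ===== PORT B =====
-- grid[r][c] == 1, B's own accessor (false if out of range)
def pvCellB (g : List (List Int)) (r c : Int) : Bool :=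
  match PySem.List.pyGet? g r with
  | some row => PySem.List.pyGet? row c == some (1 : Int)
  | none => false

-- abs(r - lr) + abs(c - lc)
def pvMd (p q : Int × Int) : Int := ((p.1 - q.1).natAbs : Int) + ((p.2 - q.2).natAbs : Int)

-- Python's min(...) / max(...): the [] case is unreachable (Python would raise ValueError)
def pvMinList (l : List Int) : Int :=
  match l with
  | [] => -1
  | d :: ds => ds.foldl min d

def pvMaxList (l : List Int) : Int :=
  match l with
  | [] => -1
  | d :: ds => ds.foldl max d

def maxDistance_reverted_alt (grid : List (List Int)) : Int :=
  let R : Int := grid.length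
  let C : Int := (grid.headD []).length
  let land := (PySem.List.pyRange 0 R 1).flatMap (fun r =>
    (PySem.List.pyRange 0 C 1).filterMap (fun c =>
      if pvCellB grid r c then some (r, c) else none))
  if land.length = 0 ∨ (land.length : Int) = R * C then -1
  else
    let vals := (PySem.List.pyRange 0 R 1).flatMap (fun r =>
      (PySem.List.pyRange 0 C 1).filterMap (fun c =>
        if pvCellB grid r c then none
        else some (pvMinList (land.map (fun l => pvMd (r, c) l)))))
    pvMaxList vals

-- ===== PRECONDITION & SPEC =====
-- Pre_ excludes exactly the inputs where Python A raises an IndexError: the empty grid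
-- (grid[0] raises) and ragged grids with some row shorter than row 0 (grid[r][c] raises).
def Pre_maxDistance_reverted (grid : List (List Int)) : Prop :=
  grid ≠ [] ∧ ∀ row ∈ grid, (grid.headD []).length ≤ row.length
instance (grid : List (List Int)) : Decidable (Pre_maxDistance_reverted grid) := by
  unfold Pre_maxDistance_reverted; infer_instance

def pvWitness_maxDistance_reverted : List (List Int) := [[1, 0], [0, 0]]

def Spec_maxDistance_reverted (grid : List (List Int)) (out : Int) : Prop := out = maxDistance_reverted_alt grid
instance (grid : List (List Int)) (out : Int) : Decidable (Spec_maxDistance_reverted grid out) := by unfold Spec_maxDistance_reverted; infer_instance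

-- ===== CLAIM (what is proved, stated in full; the proofs are below) =====
def Claim_equal_maxDistance_reverted : Prop := ∀ (grid : List (List Int)), Dom_maxDistance_reverted grid → Pre_maxDistance_reverted grid → Spec_maxDistance_reverted grid (maxDistance_reverted grid)

-- ===== LEMMAS AND PROOFS =====

-- ---- the mathematical layer: in-bounds cells, Manhattan distance to the nearest land cell ----

def pvInB (R C : Int) (p : Int × Int) : Prop := 0 ≤ p.1 ∧ p.1 < R ∧ 0 ≤ p.2 ∧ p.2 < C

def pvMdN (p q : Int × Int) : Nat := (p.1 - q.1).natAbs + (p.2 - q.2).natAbs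

def pvLand (g : List (List Int)) (R C : Int) (p : Int × Int) : Prop :=
  pvInB R C p ∧ pvCell1 g p.1 p.2 = true

noncomputable def pvDist (g : List (List Int)) (R C : Int) (p : Int × Int) : Nat :=
  sInf {n | ∃ q, pvLand g R C q ∧ pvMdN p q = n}

noncomputable def pvD (g : List (List Int)) (R C : Int) : Nat :=
  ((Finset.Icc (0:Int) (R-1)) ×ˢ (Finset.Icc (0:Int) (C-1))).sup (pvDist g R C)

def pvShape (g g' : List (List Int)) : Prop := g'.map List.length = g.map List.length

-- ---- basic facts about pvDist ----

theorem pvDistSet_ne (g : List (List Int)) (R C : Int) (hne : ∃ q, pvLand g R C q)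
    (p : Int × Int) : {n | ∃ q, pvLand g R C q ∧ pvMdN p q = n}.Nonempty := by
  obtain ⟨q, hq⟩ := hne; exact ⟨pvMdN p q, q, hq, rfl⟩

theorem pvDist_le (g : List (List Int)) (R C : Int) (p q : Int × Int)
    (hq : pvLand g R C q) : pvDist g R C p ≤ pvMdN p q :=
  Nat.sInf_le ⟨q, hq, rfl⟩

theorem pvDist_attained (g : List (List Int)) (R C : Int) (hne : ∃ q, pvLand g R C q)
    (p : Int × Int) : ∃ q, pvLand g R C q ∧ pvMdN p q = pvDist g R C p :=
  Nat.sInf_mem (pvDistSet_ne g R C hne p)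

theorem pvMdN_triangle (p r q : Int × Int) : pvMdN p q ≤ pvMdN p r + pvMdN r q := by
  simp only [pvMdN]; omega

theorem pvDist_lip (g : List (List Int)) (R C : Int) (hne : ∃ q, pvLand g R C q)
    (p p' : Int × Int) : pvDist g R C p ≤ pvDist g R C p' + pvMdN p p' := by
  obtain ⟨q, hq, hmd⟩ := pvDist_attained g R C hne p'
  calc pvDist g R C p ≤ pvMdN p q := pvDist_le g R C p q hq
    _ ≤ pvMdN p p' + pvMdN p' q := pvMdN_triangle p p' q
    _ = pvDist g R C p' + pvMdN p p' := by omega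

theorem pvDist_zero_iff (g : List (List Int)) (R C : Int) (hne : ∃ q, pvLand g R C q)
    (p : Int × Int) (hp : pvInB R C p) :
    (pvDist g R C p = 0 ↔ pvCell1 g p.1 p.2 = true) := by
  constructor
  · intro h
    obtain ⟨q, hq, hmd⟩ := pvDist_attained g R C hne p
    have : q = p := by
      obtain ⟨a, b⟩ := p; obtain ⟨x, y⟩ := q
      simp only [pvMdN, h] at hmd
      simp only [Prod.mk.injEq]
      omega
    rw [← this]; exact hq.2
  · intro h
    have : pvDist g R C p ≤ pvMdN p p := pvDist_le g R C p p ⟨hp, h⟩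
    simp only [pvMdN] at this; omega

theorem pvStep_down (g : List (List Int)) (R C : Int) (hne : ∃ q, pvLand g R C q)
    (p : Int × Int) (k : Nat) (hp : pvInB R C p) (hd : pvDist g R C p = k + 1) :
    ∃ p', pvInB R C p' ∧ pvMdN p p' = 1 ∧ pvDist g R C p' = k := by
  obtain ⟨q, hq, hmd⟩ := pvDist_attained g R C hne p
  rw [hd] at hmd
  have key : ∀ p', pvInB R C p' → pvMdN p p' = 1 → pvMdN p' q = k →
      ∃ p', pvInB R C p' ∧ pvMdN p p' = 1 ∧ pvDist g R C p' = k := by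
    intro p' h1 h2 h3
    refine ⟨p', h1, h2, le_antisymm (h3 ▸ pvDist_le g R C p' q hq) ?_⟩
    have hlip := pvDist_lip g R C hne p p'
    omega
  obtain ⟨a, b⟩ := p; obtain ⟨x, y⟩ := q
  obtain ⟨ha0, haR, hb0, hbC⟩ := hp
  obtain ⟨⟨hx0, hxR, hy0, hyC⟩, _⟩ := hq
  simp only [pvMdN] at hmd
  simp only at ha0 haR hb0 hbC hx0 hxR hy0 hyC
  rcases lt_trichotomy a x with hax | hax | hax
  · exact key (a + 1, b) ⟨show (0:Int) ≤ a + 1 by omega, show a + 1 < R by omega,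
      show (0:Int) ≤ b by omega, show b < C by omega⟩ (by simp only [pvMdN]; omega) (by simp only [pvMdN]; omega)
  · rcases lt_trichotomy b y with hby | hby | hby
    · exact key (a, b + 1) ⟨show (0:Int) ≤ a by omega, show a < R by omega,
        show (0:Int) ≤ b + 1 by omega, show b + 1 < C by omega⟩ (by simp only [pvMdN]; omega) (by simp only [pvMdN]; omega)
    · exfalso; omega
    · exact key (a, b - 1) ⟨show (0:Int) ≤ a by omega, show a < R by omega,
        show (0:Int) ≤ b - 1 by omega, show b - 1 < C by omega⟩ (by simp only [pvMdN]; omega) (by simp only [pvMdN]; omega)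
  · exact key (a - 1, b) ⟨show (0:Int) ≤ a - 1 by omega, show a - 1 < R by omega,
      show (0:Int) ≤ b by omega, show b < C by omega⟩ (by simp only [pvMdN]; omega) (by simp only [pvMdN]; omega)

theorem pvMem_grid_finset (R C : Int) (p : Int × Int) :
    p ∈ ((Finset.Icc (0:Int) (R-1)) ×ˢ (Finset.Icc (0:Int) (C-1))) ↔ pvInB R C p := by
  obtain ⟨a, b⟩ := p
  simp [Finset.mem_product, Finset.mem_Icc, pvInB]
  omega

theorem pvDist_le_D (g : List (List Int)) (R C : Int) (p : Int × Int) (hp : pvInB R C p) :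
    pvDist g R C p ≤ pvD g R C :=
  Finset.le_sup ((pvMem_grid_finset R C p).2 hp)

theorem pvD_attained (g : List (List Int)) (R C : Int) (hne : ∃ q, pvLand g R C q) :
    ∃ p, pvInB R C p ∧ pvDist g R C p = pvD g R C := by
  obtain ⟨q, hq⟩ := hne
  obtain ⟨p, hp, hsup⟩ := Finset.exists_mem_eq_sup _ ⟨q, (pvMem_grid_finset R C q).2 hq.1⟩ (pvDist g R C)
  exact ⟨p, (pvMem_grid_finset R C p).1 hp, hsup.symm⟩

theorem pvFrontier_ne (g : List (List Int)) (R C : Int) (hne : ∃ q, pvLand g R C q) :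
    ∀ (d k : Nat), k + d = pvD g R C → ∃ p, pvInB R C p ∧ pvDist g R C p = k := by
  intro d
  induction d with
  | zero => intro k hk; obtain ⟨p, hp, hd⟩ := pvD_attained g R C hne; exact ⟨p, hp, by omega⟩
  | succ d ih =>
    intro k hk
    obtain ⟨p, hp, hd⟩ := ih (k+1) (by omega)
    obtain ⟨p', hp', hmd, hd'⟩ := pvStep_down g R C hne p k hp hd
    exact ⟨p', hp', hd'⟩

theorem pvNbr_cases (p q : Int × Int) (h : pvMdN p q = 1) :
    p = (q.1 + 1, q.2) ∨ p = (q.1 - 1, q.2) ∨ p = (q.1, q.2 + 1) ∨ p = (q.1, q.2 - 1) := by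
  obtain ⟨a, b⟩ := p; obtain ⟨x, y⟩ := q
  simp only [pvMdN] at h
  simp only [Prod.mk.injEq]
  omega

-- ---- concrete grid access lemmas ----

theorem pvShape_len (g g' : List (List Int)) (h : pvShape g g') : g'.length = g.length := by
  have := congrArg List.length h; simpa using this

theorem pvShape_row (g g' : List (List Int)) (h : pvShape g g') (i : Nat)
    (h1 : i < g'.length) (h2 : i < g.length) : (g'[i]).length = (g[i]).length := by
  have := congrArg (fun l => l[i]?) h
  simp only [List.getElem?_map] at this
  rw [List.getElem?_eq_getElem h1, List.getElem?_eq_getElem h2] at this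
  simpa using this

theorem pvCell1_eq' (g' : List (List Int)) (row : List Int) (r c : Int)
    (hr0 : 0 ≤ r) (hc0 : 0 ≤ c) (hrow : g'[r.toNat]? = some row) :
    pvCell1 g' r c = (row[c.toNat]? == some 1) := by
  simp only [pvCell1, PySem.List.pyGet?_of_nonneg g' hr0, PySem.List.pyGet?_of_nonneg row hc0, hrow]

theorem pvSet1_eq (g' : List (List Int)) (row : List Int) (r c : Int)
    (hr0 : 0 ≤ r) (hrow : g'[r.toNat]? = some row) :
    pvSet1 g' r c = g'.set r.toNat (row.set c.toNat 1) := by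
  simp only [pvSet1, PySem.List.pyGet?_of_nonneg g' hr0, hrow]

theorem pvSet1_shape (g' : List (List Int)) (r c : Int) (hr0 : 0 ≤ r)
    (hrl : r.toNat < g'.length) :
    (pvSet1 g' r c).map List.length = g'.map List.length := by
  rw [pvSet1_eq g' (g'[r.toNat]) r c hr0 (List.getElem?_eq_getElem hrl)]
  refine List.ext_getElem? fun j => ?_
  simp only [List.getElem?_map, List.getElem?_set]
  by_cases hj : r.toNat = j
  · subst hj
    simp [hrl, List.getElem?_eq_getElem hrl]
  · simp [hj]

theorem pvCell1_set1 (g' : List (List Int)) (r c r' c' : Int)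
    (hr0 : 0 ≤ r) (hrl : r.toNat < g'.length) (hc0 : 0 ≤ c)
    (hcl : c.toNat < (g'[r.toNat]).length)
    (hr'0 : 0 ≤ r') (hr'l : r'.toNat < g'.length) (hc'0 : 0 ≤ c') :
    pvCell1 (pvSet1 g' r c) r' c' = if r' = r ∧ c' = c then true else pvCell1 g' r' c' := by
  have hset := pvSet1_eq g' (g'[r.toNat]) r c hr0 (List.getElem?_eq_getElem hrl)
  by_cases hrr : r' = r
  · subst hrr
    have hrow' : (pvSet1 g' r' c)[r'.toNat]? = some ((g'[r'.toNat]).set c.toNat 1) := by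
      rw [hset]
      simp [List.getElem?_set, hr'l]
    rw [pvCell1_eq' _ _ _ _ hr'0 hc'0 hrow',
        pvCell1_eq' g' (g'[r'.toNat]) r' c' hr'0 hc'0 (List.getElem?_eq_getElem hr'l)]
    by_cases hcc : c' = c
    · subst hcc
      have : ((g'[r'.toNat]).set c'.toNat 1)[c'.toNat]? = some 1 := by
        simp [List.getElem?_set, hcl]
      simp [this]
    · have hne' : c.toNat ≠ c'.toNat := by omega
      simp [List.getElem?_set, hne', hcc]
  · have hne' : r.toNat ≠ r'.toNat := by omega
    have hrow' : (pvSet1 g' r c)[r'.toNat]? = some (g'[r'.toNat]) := by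
      rw [hset]
      simp [List.getElem?_set, hne', List.getElem?_eq_getElem hr'l]
    rw [pvCell1_eq' _ _ _ _ hr'0 hc'0 hrow',
        pvCell1_eq' g' (g'[r'.toNat]) r' c' hr'0 hc'0 (List.getElem?_eq_getElem hr'l)]
    simp [hrr]

-- ---- membership in the generated comprehension lists ----

theorem pvMem_landList (g : List (List Int)) (R C : Int) (z : Int × Int) :
    z ∈ pvLandList g R C ↔ pvInB R C z ∧ pvCell1 g z.1 z.2 = true := by
  obtain ⟨a, b⟩ := z
  simp only [pvLandList, List.mem_flatMap, List.mem_filterMap, PySem.List.mem_pyRange_one, pvInB]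
  constructor
  · rintro ⟨r, hr, c, hc, hsome⟩
    by_cases h : pvCell1 g r c
    · rw [if_pos h] at hsome
      obtain ⟨rfl, rfl⟩ : r = a ∧ c = b := by simpa [Prod.ext_iff] using hsome
      exact ⟨⟨by omega, by omega, by omega, by omega⟩, h⟩
    · rw [if_neg h] at hsome
      exact absurd hsome (by simp)
  · rintro ⟨⟨ha0, haR, hb0, hbC⟩, hcell⟩
    exact ⟨a, ⟨by omega, by omega⟩, b, ⟨by omega, by omega⟩, by simp [hcell]⟩

theorem pvFilterMap_if_eq_map (P : Int → Bool) (v : Int → Int × Int) :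
    ∀ (l : List Int), (∀ x ∈ l, P x = true) →
      l.filterMap (fun c => if P c then some (v c) else none) = l.map v := by
  intro l
  induction l with
  | nil => intro _; rfl
  | cons a l ih =>
    intro h
    rw [List.filterMap_cons, List.map_cons, if_pos (h a List.mem_cons_self)]
    rw [ih (fun x hx => h x (List.mem_cons_of_mem _ hx))]

theorem pvFlatMap_congr (f f' : Int → List (Int × Int)) :
    ∀ (l : List Int), (∀ x ∈ l, f x = f' x) → l.flatMap f = l.flatMap f' := by
  intro l
  induction l with
  | nil => intro _; rfl
  | cons a l ih =>
    intro h
    rw [List.flatMap_cons, List.flatMap_cons, h a List.mem_cons_self,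
      ih (fun x hx => h x (List.mem_cons_of_mem _ hx))]

theorem pvSum_const (m : Nat) : ∀ (l : List Int), (l.map (fun _ => m)).sum = l.length * m := by
  intro l
  induction l with
  | nil => simp
  | cons a l ih => simp [ih]; ring

theorem pvLandList_full (g : List (List Int)) (Rn Cn : Nat)
    (hall : ∀ p, pvInB (Rn : Int) (Cn : Int) p → pvCell1 g p.1 p.2 = true) :
    (pvLandList g (Rn : Int) (Cn : Int)).length = Rn * Cn := by
  unfold pvLandList
  rw [pvFlatMap_congr _ (fun r => (PySem.List.pyRange 0 (Cn : Int) 1).map (fun c => (r, c))) _ ?_]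
  · rw [List.length_flatMap]
    have h1 : ∀ r : Int, ((PySem.List.pyRange 0 (Cn:Int) 1).map (fun c => (r, c))).length = Cn := by
      intro r; rw [List.length_map, PySem.List.length_pyRange_one]; omega
    calc ((PySem.List.pyRange 0 (Rn:Int) 1).map
            (fun r => ((PySem.List.pyRange 0 (Cn:Int) 1).map (fun c => (r, c))).length)).sum
        = ((PySem.List.pyRange 0 (Rn:Int) 1).map (fun _ => Cn)).sum := by
          congr 1; exact List.map_congr_left (fun r _ => h1 r)
      _ = (PySem.List.pyRange 0 (Rn:Int) 1).length * Cn := pvSum_const Cn _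
      _ = Rn * Cn := by rw [PySem.List.length_pyRange_one]; simp
  · intro r hr
    rw [PySem.List.mem_pyRange_one] at hr
    apply pvFilterMap_if_eq_map
    intro c hc
    rw [PySem.List.mem_pyRange_one] at hc
    exact hall (r, c) ⟨by omega, by omega, by omega, by omega⟩

-- ---- the BFS invariants ----

def pvInv (g : List (List Int)) (Cn : Nat) (k : Nat)
    (st : List (List Int) × List (Int × Int)) : Prop :=
  pvShape g st.1 ∧
  (∀ p, pvInB (g.length : Int) (Cn : Int) p →
    (pvCell1 st.1 p.1 p.2 = true ↔ (pvDist g (g.length : Int) (Cn : Int) p ≤ k ∨ p ∈ st.2))) ∧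
  (∀ p ∈ st.2, pvInB (g.length : Int) (Cn : Int) p ∧ pvDist g (g.length : Int) (Cn : Int) p = k + 1)

def pvOInv (g : List (List Int)) (Cn : Nat) (k : Nat)
    (g' : List (List Int)) (q : List (Int × Int)) : Prop :=
  pvShape g g' ∧
  (∀ p, pvInB (g.length : Int) (Cn : Int) p →
    (pvCell1 g' p.1 p.2 = true ↔ pvDist g (g.length : Int) (Cn : Int) p ≤ k)) ∧
  (∀ z ∈ q, pvInB (g.length : Int) (Cn : Int) z ∧ pvDist g (g.length : Int) (Cn : Int) z = k) ∧
  (∀ p, pvInB (g.length : Int) (Cn : Int) p → pvDist g (g.length : Int) (Cn : Int) p = k → p ∈ q)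

theorem pvStep_lemma (g : List (List Int)) (Cn : Nat)
    (hrow : ∀ row ∈ g, Cn ≤ row.length)
    (hne : ∃ q, pvLand g (g.length : Int) (Cn : Int) q)
    (k : Nat) (r c : Int)
    (hin : pvInB (g.length : Int) (Cn : Int) (r, c))
    (hdk : pvDist g (g.length : Int) (Cn : Int) (r, c) = k)
    (st : List (List Int) × List (Int × Int)) (hInv : pvInv g Cn k st)
    (d : Int × Int) (hd : pvMdN (r + d.1, c + d.2) (r, c) = 1) :
    pvInv g Cn k (pvStep (g.length : Int) (Cn : Int) r c st d) ∧
    (∃ t, (pvStep (g.length : Int) (Cn : Int) r c st d).2 = st.2 ++ t) ∧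
    (pvInB (g.length : Int) (Cn : Int) (r + d.1, c + d.2) →
      pvDist g (g.length : Int) (Cn : Int) (r + d.1, c + d.2) = k + 1 →
      (r + d.1, c + d.2) ∈ (pvStep (g.length : Int) (Cn : Int) r c st d).2) := by
  obtain ⟨hShape, hM, hAcc⟩ := hInv
  simp only [pvStep]
  split_ifs with hcond
  · refine ⟨⟨hShape, hM, hAcc⟩, ⟨[], by simp⟩, ?_⟩
    intro hinB hdist
    have hc1 : pvCell1 st.1 (r + d.1) (c + d.2) = true := by
      rcases hcond with h | h | h
      · exact absurd ⟨hinB.1, hinB.2.1⟩ h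
      · exact absurd ⟨hinB.2.2.1, hinB.2.2.2⟩ h
      · exact h
    rcases (hM _ hinB).1 hc1 with h | h
    · omega
    · exact h
  · push_neg at hcond
    obtain ⟨h1, h2, hc1⟩ := hcond
    have hc1' : pvCell1 st.1 (r + d.1) (c + d.2) = false := by
      simpa using hc1
    have hinB' : pvInB (g.length : Int) (Cn : Int) (r + d.1, c + d.2) :=
      ⟨h1.1, h1.2, h2.1, h2.2⟩
    have hnot : ¬(pvDist g (g.length : Int) (Cn : Int) (r + d.1, c + d.2) ≤ k ∨
        (r + d.1, c + d.2) ∈ st.2) := by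
      intro h
      rw [(hM _ hinB').2 h] at hc1'
      simp at hc1'
    push_neg at hnot
    obtain ⟨hgt, hnotmem⟩ := hnot
    have hdist' : pvDist g (g.length : Int) (Cn : Int) (r + d.1, c + d.2) = k + 1 := by
      have hlip := pvDist_lip g (g.length : Int) (Cn : Int) hne (r + d.1, c + d.2) (r, c)
      rw [hdk, hd] at hlip
      omega
    -- bounds for the physical write
    have hslen : st.1.length = g.length := pvShape_len g st.1 hShape
    have hrl : (r + d.1).toNat < st.1.length := by
      have := h1.1; have := h1.2; omega
    have hrlg : (r + d.1).toNat < g.length := by rw [← hslen]; exact hrl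
    have hrowlen : (Cn : Int) ≤ ((st.1[(r + d.1).toNat]).length : Int) := by
      rw [pvShape_row g st.1 hShape _ hrl hrlg]
      exact_mod_cast hrow (g[(r + d.1).toNat]) (List.getElem_mem hrlg)
    have hcl : (c + d.2).toNat < (st.1[(r + d.1).toNat]).length := by
      have := h2.1; have := h2.2; omega
    refine ⟨⟨?_, ?_, ?_⟩, ⟨[(r + d.1, c + d.2)], rfl⟩, ?_⟩
    · show pvShape g (pvSet1 st.1 (r + d.1) (c + d.2))
      unfold pvShape
      rw [pvSet1_shape st.1 _ _ h1.1 hrl]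
      exact hShape
    · intro p hp
      have hp1l : p.1.toNat < st.1.length := by
        have := hp.1; have := hp.2.1; omega
      rw [pvCell1_set1 st.1 (r + d.1) (c + d.2) p.1 p.2 h1.1 hrl h2.1 hcl hp.1 hp1l hp.2.2.1]
      by_cases hpn : p = (r + d.1, c + d.2)
      · rw [if_pos (show _ ∧ _ by rw [hpn]; exact ⟨rfl, rfl⟩)]
        simp only [true_iff]
        right
        rw [hpn]
        exact List.mem_append_right _ List.mem_cons_self
      · rw [if_neg (by intro hcc; apply hpn; exact Prod.ext hcc.1 hcc.2)]
        rw [hM p hp]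
        constructor
        · rintro (h | h)
          · exact Or.inl h
          · exact Or.inr (List.mem_append_left _ h)
        · rintro (h | h)
          · exact Or.inl h
          · rcases List.mem_append.1 h with h' | h'
            · exact Or.inr h'
            · exact absurd (List.mem_singleton.1 h') hpn
    · intro p hp
      rcases List.mem_append.1 hp with h' | h'
      · exact hAcc p h'
      · rw [List.mem_singleton.1 h']
        exact ⟨hinB', hdist'⟩
    · intro _ _
      exact List.mem_append_right _ List.mem_cons_self

theorem pvVisit_lemma (g : List (List Int)) (Cn : Nat)
    (hrow : ∀ row ∈ g, Cn ≤ row.length)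
    (hne : ∃ q, pvLand g (g.length : Int) (Cn : Int) q)
    (k : Nat) (r c : Int)
    (hin : pvInB (g.length : Int) (Cn : Int) (r, c))
    (hdk : pvDist g (g.length : Int) (Cn : Int) (r, c) = k)
    (st : List (List Int) × List (Int × Int)) (hInv : pvInv g Cn k st) :
    pvInv g Cn k (pvVisit (g.length : Int) (Cn : Int) r c st) ∧
    (∃ t, (pvVisit (g.length : Int) (Cn : Int) r c st).2 = st.2 ++ t) ∧
    (∀ p, pvInB (g.length : Int) (Cn : Int) p → pvMdN p (r, c) = 1 →
      pvDist g (g.length : Int) (Cn : Int) p = k + 1 →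
      p ∈ (pvVisit (g.length : Int) (Cn : Int) r c st).2) := by
  obtain ⟨i1, ⟨t1, e1⟩, m1⟩ := pvStep_lemma g Cn hrow hne k r c hin hdk st hInv
    ((1 : Int), (0 : Int)) (by simp only [pvMdN]; omega)
  obtain ⟨i2, ⟨t2, e2⟩, m2⟩ := pvStep_lemma g Cn hrow hne k r c hin hdk _ i1
    ((-1 : Int), (0 : Int)) (by simp only [pvMdN]; omega)
  obtain ⟨i3, ⟨t3, e3⟩, m3⟩ := pvStep_lemma g Cn hrow hne k r c hin hdk _ i2
    ((0 : Int), (1 : Int)) (by simp only [pvMdN]; omega)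
  obtain ⟨i4, ⟨t4, e4⟩, m4⟩ := pvStep_lemma g Cn hrow hne k r c hin hdk _ i3
    ((0 : Int), (-1 : Int)) (by simp only [pvMdN]; omega)
  have hv : pvVisit (g.length : Int) (Cn : Int) r c st =
      pvStep (g.length : Int) (Cn : Int) r c
        (pvStep (g.length : Int) (Cn : Int) r c
          (pvStep (g.length : Int) (Cn : Int) r c
            (pvStep (g.length : Int) (Cn : Int) r c st ((1 : Int), (0 : Int)))
            ((-1 : Int), (0 : Int)))
          ((0 : Int), (1 : Int)))
        ((0 : Int), (-1 : Int)) := rfl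
  rw [hv]
  refine ⟨i4, ⟨t1 ++ t2 ++ t3 ++ t4, by rw [e4, e3, e2, e1]; simp [List.append_assoc]⟩, ?_⟩
  intro p hp hmd hdp
  rcases pvNbr_cases p (r, c) hmd with hcase | hcase | hcase | hcase
  · have hpe : p = (r + ((1:Int),(0:Int)).1, c + ((1:Int),(0:Int)).2) := by rw [hcase]; simp
    rw [hpe] at hp hdp ⊢
    rw [e4, e3, e2]
    exact List.mem_append_left _ (List.mem_append_left _ (List.mem_append_left _ (m1 hp hdp)))
  · have hpe : p = (r + ((-1:Int),(0:Int)).1, c + ((-1:Int),(0:Int)).2) := by rw [hcase]; simp [Int.sub_eq_add_neg]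
    rw [hpe] at hp hdp ⊢
    rw [e4, e3]
    exact List.mem_append_left _ (List.mem_append_left _ (m2 hp hdp))
  · have hpe : p = (r + ((0:Int),(1:Int)).1, c + ((0:Int),(1:Int)).2) := by rw [hcase]; simp
    rw [hpe] at hp hdp ⊢
    rw [e4]
    exact List.mem_append_left _ (m3 hp hdp)
  · have hpe : p = (r + ((0:Int),(-1:Int)).1, c + ((0:Int),(-1:Int)).2) := by rw [hcase]; simp [Int.sub_eq_add_neg]
    rw [hpe] at hp hdp ⊢
    exact m4 hp hdp

theorem pvLevel_lemma (g : List (List Int)) (Cn : Nat)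
    (hrow : ∀ row ∈ g, Cn ≤ row.length)
    (hne : ∃ q, pvLand g (g.length : Int) (Cn : Int) q)
    (k : Nat) :
    ∀ (todo : List (Int × Int)) (st : List (List Int) × List (Int × Int)),
    (∀ z ∈ todo, pvInB (g.length : Int) (Cn : Int) z ∧ pvDist g (g.length : Int) (Cn : Int) z = k) →
    pvInv g Cn k st →
    pvInv g Cn k (pvLevel (g.length : Int) (Cn : Int) todo st) ∧
    (∃ t, (pvLevel (g.length : Int) (Cn : Int) todo st).2 = st.2 ++ t) ∧
    (∀ p, pvInB (g.length : Int) (Cn : Int) p →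
      pvDist g (g.length : Int) (Cn : Int) p = k + 1 →
      (∃ z ∈ todo, pvMdN p z = 1) →
      p ∈ (pvLevel (g.length : Int) (Cn : Int) todo st).2) := by
  intro todo
  induction todo with
  | nil =>
    intro st _ hInv
    refine ⟨hInv, ⟨[], by simp [pvLevel]⟩, ?_⟩
    rintro p _ _ ⟨z, hz, _⟩
    simp at hz
  | cons z rest ih =>
    obtain ⟨r, c⟩ := z
    intro st htodo hInv
    have hz := htodo (r, c) List.mem_cons_self
    obtain ⟨iv, ⟨tv, ev⟩, cv⟩ := pvVisit_lemma g Cn hrow hne k r c hz.1 hz.2 st hInv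
    obtain ⟨iL, ⟨tL, eL⟩, cL⟩ := ih (pvVisit (g.length : Int) (Cn : Int) r c st)
      (fun z' hz' => htodo z' (List.mem_cons_of_mem _ hz')) iv
    have hstep : pvLevel (g.length : Int) (Cn : Int) ((r, c) :: rest) st =
        pvLevel (g.length : Int) (Cn : Int) rest (pvVisit (g.length : Int) (Cn : Int) r c st) := rfl
    rw [hstep]
    refine ⟨iL, ⟨tv ++ tL, by rw [eL, ev, List.append_assoc]⟩, ?_⟩
    rintro p hp hdp ⟨z', hz', hmd⟩
    rcases List.mem_cons.1 hz' with rfl | hz'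
    · have h := cv p hp hmd hdp
      rw [eL]
      exact List.mem_append_left _ h
    · exact cL p hp hdp ⟨z', hz', hmd⟩

theorem pvOStep (g : List (List Int)) (Cn : Nat)
    (hrow : ∀ row ∈ g, Cn ≤ row.length)
    (hne : ∃ q, pvLand g (g.length : Int) (Cn : Int) q)
    (k : Nat) (g' : List (List Int)) (q : List (Int × Int))
    (hO : pvOInv g Cn k g' q) :
    pvOInv g Cn (k+1) (pvLevel (g.length : Int) (Cn : Int) q (g', [])).1
      (pvLevel (g.length : Int) (Cn : Int) q (g', [])).2 := by
  obtain ⟨hShape, hM, hQ, hQc⟩ := hO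
  have hInv0 : pvInv g Cn k (g', []) := by
    refine ⟨hShape, fun p hp => ?_, by simp⟩
    rw [hM p hp]
    simp
  obtain ⟨⟨hS', hM', hA'⟩, _, cov⟩ := pvLevel_lemma g Cn hrow hne k q (g', []) hQ hInv0
  have hcov' : ∀ p, pvInB (g.length : Int) (Cn : Int) p →
      pvDist g (g.length : Int) (Cn : Int) p = k + 1 →
      p ∈ (pvLevel (g.length : Int) (Cn : Int) q (g', [])).2 := by
    intro p hp hdp
    obtain ⟨p', hin', hmd', hdist'⟩ := pvStep_down g (g.length : Int) (Cn : Int) hne p k hp hdp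
    exact cov p hp hdp ⟨p', hQc p' hin' hdist', hmd'⟩
  refine ⟨hS', ?_, ?_, hcov'⟩
  · intro p hp
    rw [hM' p hp]
    constructor
    · rintro (h | h)
      · omega
      · rw [(hA' p h).2]
    · intro h
      by_cases hk : pvDist g (g.length : Int) (Cn : Int) p ≤ k
      · exact Or.inl hk
      · exact Or.inr (hcov' p hp (by omega))
  · intro z hz
    exact hA' z hz

theorem pvLoop_nil (R C : Int) (fuel : Nat) (g : List (List Int)) (res : Int) :
    pvLoop R C fuel g [] res = res := by
  cases fuel <;> simp [pvLoop]

theorem pvLoop_eval (g : List (List Int)) (Cn : Nat)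
    (hrow : ∀ row ∈ g, Cn ≤ row.length)
    (hne : ∃ q, pvLand g (g.length : Int) (Cn : Int) q) :
    ∀ (fuel k : Nat) (g' : List (List Int)) (q : List (Int × Int)) (res : Int),
    pvOInv g Cn k g' q → k ≤ pvD g (g.length : Int) (Cn : Int) →
    pvD g (g.length : Int) (Cn : Int) + 1 - k ≤ fuel →
    pvLoop (g.length : Int) (Cn : Int) fuel g' q res
      = res + ((pvD g (g.length : Int) (Cn : Int) - k : Nat) : Int) + 1 := by
  intro fuel
  induction fuel with
  | zero => intro k g' q res _ _ hfuel; omega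
  | succ fuel ih =>
    intro k g' q res hO hk hfuel
    have hqne : q ≠ [] := by
      obtain ⟨p, hp, hdp⟩ := pvFrontier_ne g (g.length : Int) (Cn : Int) hne
        (pvD g (g.length : Int) (Cn : Int) - k) k (by omega)
      intro h
      have := hO.2.2.2 p hp hdp
      rw [h] at this
      simp at this
    obtain ⟨a, q', rfl⟩ := List.exists_cons_of_ne_nil hqne
    have hred : pvLoop (g.length : Int) (Cn : Int) (fuel + 1) g' (a :: q') res =
        pvLoop (g.length : Int) (Cn : Int) fuel
          (pvLevel (g.length : Int) (Cn : Int) (a :: q') (g', [])).1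
          (pvLevel (g.length : Int) (Cn : Int) (a :: q') (g', [])).2 (res + 1) := rfl
    rw [hred]
    have hO' := pvOStep g Cn hrow hne k g' (a :: q') hO
    by_cases hkD : k = pvD g (g.length : Int) (Cn : Int)
    · have hnil : (pvLevel (g.length : Int) (Cn : Int) (a :: q') (g', [])).2 = [] := by
        rw [List.eq_nil_iff_forall_not_mem]
        intro z hz
        have h1 := hO'.2.2.1 z hz
        have h2 := pvDist_le_D g (g.length : Int) (Cn : Int) z h1.1
        omega
      rw [hnil, pvLoop_nil]
      have : pvD g (g.length : Int) (Cn : Int) - k = 0 := by omega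
      rw [this]
      simp
    · have hrec := ih (k + 1) _ _ (res + 1) hO' (by omega) (by omega)
      rw [hrec]
      have h1 : (pvD g (g.length : Int) (Cn : Int) - k : Nat)
          = (pvD g (g.length : Int) (Cn : Int) - (k + 1) : Nat) + 1 := by omega
      rw [h1]
      push_cast
      ring

theorem pvInit (g : List (List Int)) (Cn : Nat)
    (hrow : ∀ row ∈ g, Cn ≤ row.length)
    (hne : ∃ q, pvLand g (g.length : Int) (Cn : Int) q) :
    pvOInv g Cn 0 g (pvLandList g (g.length : Int) (Cn : Int)) := by
  refine ⟨rfl, ?_, ?_, ?_⟩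
  · intro p hp
    rw [Nat.le_zero]
    exact (pvDist_zero_iff g (g.length : Int) (Cn : Int) hne p hp).symm
  · intro z hz
    have h := (pvMem_landList g (g.length : Int) (Cn : Int) z).1 hz
    exact ⟨h.1, (pvDist_zero_iff g (g.length : Int) (Cn : Int) hne z h.1).2 h.2⟩
  · intro p hp hd
    exact (pvMem_landList g (g.length : Int) (Cn : Int) p).2
      ⟨hp, (pvDist_zero_iff g (g.length : Int) (Cn : Int) hne p hp).1 hd⟩

theorem pvD_bound (g : List (List Int)) (Cn : Nat)
    (hne : ∃ q, pvLand g (g.length : Int) (Cn : Int) q) :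
    pvD g (g.length : Int) (Cn : Int) ≤ g.length * Cn := by
  obtain ⟨p, hp, hD⟩ := pvD_attained g (g.length : Int) (Cn : Int) hne
  obtain ⟨q, hq⟩ := hne
  have h1 : pvDist g (g.length : Int) (Cn : Int) p ≤ pvMdN p q :=
    pvDist_le g (g.length : Int) (Cn : Int) p q hq
  obtain ⟨a1, a2⟩ := p
  obtain ⟨x1, x2⟩ := q
  obtain ⟨ha0, haR, hb0, hbC⟩ := hp
  obtain ⟨⟨hx0, hxR, hy0, hyC⟩, _⟩ := hq
  simp only at ha0 haR hb0 hbC hx0 hxR hy0 hyC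
  have hR1 : 1 ≤ g.length := by omega
  have hC1 : 1 ≤ Cn := by omega
  have hmd : pvMdN (a1, a2) (x1, x2) ≤ (g.length - 1) + (Cn - 1) := by
    simp only [pvMdN]
    omega
  have key : ∀ (x y : Nat), 1 ≤ x → 1 ≤ y → (x - 1) + (y - 1) ≤ x * y := by
    intro x y hx hy
    obtain ⟨a, rfl⟩ : ∃ a, x = a + 1 := ⟨x - 1, by omega⟩
    obtain ⟨b, rfl⟩ : ∃ b, y = b + 1 := ⟨y - 1, by omega⟩
    have hmul : (a + 1) * (b + 1) = a * b + a + b + 1 := by ring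
    omega
  have hkey := key g.length Cn hR1 hC1
  omega

-- ---- B-side lemmas ----

theorem pvCellB_eq : pvCellB = pvCell1 := rfl

theorem pvFoldl_min_le' (l : List Int) : ∀ (d : Int),
    l.foldl min d ≤ d ∧ ∀ x ∈ l, l.foldl min d ≤ x := by
  induction l with
  | nil => intro d; simp
  | cons a l ih =>
    intro d
    obtain ⟨h1, h2⟩ := ih (min d a)
    simp only [List.foldl_cons]
    refine ⟨le_trans h1 (min_le_left d a), fun x hx => ?_⟩
    rcases List.mem_cons.1 hx with rfl | hx
    · exact le_trans h1 (min_le_right d x)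
    · exact h2 x hx

theorem pvFoldl_min_le (l : List Int) (d x : Int) (hx : x ∈ d :: l) : l.foldl min d ≤ x := by
  rcases List.mem_cons.1 hx with rfl | hx
  · exact (pvFoldl_min_le' l x).1
  · exact (pvFoldl_min_le' l d).2 x hx

theorem pvFoldl_min_mem (l : List Int) (d : Int) : l.foldl min d ∈ d :: l := by
  induction l generalizing d with
  | nil => simp
  | cons a l ih =>
    simp only [List.foldl_cons]
    have h := ih (min d a)
    rcases List.mem_cons.1 h with h' | h'
    · rcases min_choice d a with hm | hm <;> rw [h', hm]
      · exact List.mem_cons_self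
      · exact List.mem_cons_of_mem _ List.mem_cons_self
    · exact List.mem_cons_of_mem _ (List.mem_cons_of_mem _ h')

theorem pvFoldl_max_ge' (l : List Int) : ∀ (d : Int),
    d ≤ l.foldl max d ∧ ∀ x ∈ l, x ≤ l.foldl max d := by
  induction l with
  | nil => intro d; simp
  | cons a l ih =>
    intro d
    obtain ⟨h1, h2⟩ := ih (max d a)
    simp only [List.foldl_cons]
    refine ⟨le_trans (le_max_left d a) h1, fun x hx => ?_⟩
    rcases List.mem_cons.1 hx with rfl | hx
    · exact le_trans (le_max_right d x) h1
    · exact h2 x hx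

theorem pvFoldl_max_ge (l : List Int) (d x : Int) (hx : x ∈ d :: l) : x ≤ l.foldl max d := by
  rcases List.mem_cons.1 hx with rfl | hx
  · exact (pvFoldl_max_ge' l x).1
  · exact (pvFoldl_max_ge' l d).2 x hx

theorem pvFoldl_max_mem (l : List Int) (d : Int) : l.foldl max d ∈ d :: l := by
  induction l generalizing d with
  | nil => simp
  | cons a l ih =>
    simp only [List.foldl_cons]
    have h := ih (max d a)
    rcases List.mem_cons.1 h with h' | h'
    · rcases max_choice d a with hm | hm <;> rw [h', hm]
      · exact List.mem_cons_self
      · exact List.mem_cons_of_mem _ List.mem_cons_self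
    · exact List.mem_cons_of_mem _ (List.mem_cons_of_mem _ h')

theorem pvMd_eq (p q : Int × Int) : pvMd p q = (pvMdN p q : Int) := by
  simp [pvMd, pvMdN]

theorem pvB_min (g : List (List Int)) (R C : Int) (hne : ∃ q, pvLand g R C q)
    (p : Int × Int) :
    pvMinList ((pvLandList g R C).map (fun l => pvMd p l)) = ((pvDist g R C p : Nat) : Int) := by
  cases hL : (pvLandList g R C).map (fun l => pvMd p l) with
  | nil =>
    exfalso
    obtain ⟨q, hq⟩ := hne
    have hmem : q ∈ pvLandList g R C := (pvMem_landList g R C q).2 ⟨hq.1, hq.2⟩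
    have : pvMd p q ∈ (pvLandList g R C).map (fun l => pvMd p l) := List.mem_map_of_mem hmem
    rw [hL] at this
    simp at this
  | cons d ds =>
    show ds.foldl min d = ((pvDist g R C p : Nat) : Int)
    apply le_antisymm
    · obtain ⟨q, hq, hmd⟩ := pvDist_attained g R C hne p
      have hmem : pvMd p q ∈ d :: ds := by
        rw [← hL]
        exact List.mem_map_of_mem ((pvMem_landList g R C q).2 ⟨hq.1, hq.2⟩)
      have h := pvFoldl_min_le ds d _ hmem
      rwa [pvMd_eq, hmd] at h
    · have hmem := pvFoldl_min_mem ds d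
      rw [← hL] at hmem
      obtain ⟨l0, hl0, heq⟩ := List.mem_map.1 hmem
      have hq0 := (pvMem_landList g R C l0).1 hl0
      rw [← heq, pvMd_eq]
      exact_mod_cast pvDist_le g R C p l0 ⟨hq0.1, hq0.2⟩

theorem pvLandListB_eq (g : List (List Int)) (R C : Int) :
    ((PySem.List.pyRange 0 R 1).flatMap (fun r =>
      (PySem.List.pyRange 0 C 1).filterMap (fun c =>
        if pvCell1 g r c then some (r, c) else none))) = pvLandList g R C := rfl

theorem pvMaxList_eq_of (L : List Int) (D : Int) (hub : ∀ x ∈ L, x ≤ D) (hmem : D ∈ L) :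
    pvMaxList L = D := by
  cases L with
  | nil => simp at hmem
  | cons v vs =>
    show vs.foldl max v = D
    exact le_antisymm (hub _ (pvFoldl_max_mem vs v)) (pvFoldl_max_ge vs v D hmem)

theorem pvMem_waterVals (g : List (List Int)) (R C : Int) (z : Int) :
    (z ∈ (PySem.List.pyRange 0 R 1).flatMap (fun r =>
      (PySem.List.pyRange 0 C 1).filterMap (fun c =>
        if pvCell1 g r c then none
        else some (pvMinList ((pvLandList g R C).map (fun l => pvMd (r, c) l)))))) ↔
    ∃ p, pvInB R C p ∧ pvCell1 g p.1 p.2 = false ∧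
      z = pvMinList ((pvLandList g R C).map (fun l => pvMd p l)) := by
  simp only [List.mem_flatMap, List.mem_filterMap, PySem.List.mem_pyRange_one]
  constructor
  · rintro ⟨r, hr, c, hc, hsome⟩
    by_cases h : pvCell1 g r c
    · rw [if_pos h] at hsome
      exact absurd hsome (by simp)
    · rw [if_neg h] at hsome
      have hz : z = pvMinList ((pvLandList g R C).map (fun l => pvMd (r, c) l)) :=
        (Option.some.inj hsome).symm
      exact ⟨(r, c), ⟨by omega, by omega, by omega, by omega⟩, by simpa using h, hz⟩
  · rintro ⟨⟨a, b⟩, ⟨ha0, haR, hb0, hbC⟩, hcell, hz⟩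
    refine ⟨a, ⟨by omega, by omega⟩, b, ⟨by omega, by omega⟩, ?_⟩
    rw [if_neg (by simp [hcell])]
    rw [hz]

-- ---- final assembly ----

theorem pvMain (g : List (List Int)) (hpre : Pre_maxDistance_reverted g) :
    maxDistance_reverted g = maxDistance_reverted_alt g := by
  obtain ⟨hg0, hrowpre⟩ := hpre
  simp only [maxDistance_reverted, maxDistance_reverted_alt]
  rw [pvCellB_eq, pvLandListB_eq]
  by_cases hg : ((pvLandList g (g.length : Int) ((g.headD []).length : Int)).length = 0 ∨
      ((pvLandList g (g.length : Int) ((g.headD []).length : Int)).length : Int)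
        = (g.length : Int) * ((g.headD []).length : Int))
  · rw [if_pos (by tauto), if_pos hg]
  · rw [if_neg (by tauto), if_neg hg]
    push_neg at hg
    obtain ⟨hlen0, hlenRC⟩ := hg
    have hne : ∃ q, pvLand g (g.length : Int) ((g.headD []).length : Int) q := by
      have hnil : pvLandList g (g.length : Int) ((g.headD []).length : Int) ≠ [] := by
        intro h
        rw [h] at hlen0
        simp at hlen0
      obtain ⟨z, hz⟩ := List.exists_mem_of_ne_nil _ hnil
      have h := (pvMem_landList g _ _ z).1 hz
      exact ⟨z, h.1, h.2⟩
    have hwater : ∃ w, pvInB (g.length : Int) ((g.headD []).length : Int) w ∧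
        pvCell1 g w.1 w.2 = false := by
      by_contra hcon
      push_neg at hcon
      have hall : ∀ p, pvInB (g.length : Int) ((g.headD []).length : Int) p →
          pvCell1 g p.1 p.2 = true := by
        intro p hp
        have := hcon p hp
        cases h : pvCell1 g p.1 p.2
        · exact absurd h this
        · rfl
      have hfull := pvLandList_full g g.length (g.headD []).length hall
      apply hlenRC
      rw [hfull]
      push_cast
      ring
    have hDpos : 1 ≤ pvD g (g.length : Int) ((g.headD []).length : Int) := by
      obtain ⟨w, hw, hwf⟩ := hwater
      have h1 := pvDist_le_D g (g.length : Int) ((g.headD []).length : Int) w hw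
      have h0 : pvDist g (g.length : Int) ((g.headD []).length : Int) w ≠ 0 := by
        intro h
        have := (pvDist_zero_iff g _ _ hne w hw).1 h
        rw [this] at hwf
        simp at hwf
      omega
    rw [pvLoop_eval g (g.headD []).length hrowpre hne
      (g.length * (g.headD []).length + 1) 0 g
      (pvLandList g (g.length : Int) ((g.headD []).length : Int)) (-1)
      (pvInit g (g.headD []).length hrowpre hne) (Nat.zero_le _)
      (by have := pvD_bound g (g.headD []).length hne; omega)]
    have hA : (-1 : Int) +
        ((pvD g (g.length : Int) ((g.headD []).length : Int) - 0 : Nat) : Int) + 1 =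
        ((pvD g (g.length : Int) ((g.headD []).length : Int) : Nat) : Int) := by
      simp
    rw [hA]
    symm
    apply pvMaxList_eq_of
    · intro x hx
      obtain ⟨p, hp, hpw, hxeq⟩ := (pvMem_waterVals g (g.length : Int)
        ((g.headD []).length : Int) x).1 hx
      rw [hxeq, pvB_min g _ _ hne p]
      exact_mod_cast pvDist_le_D g _ _ p hp
    · obtain ⟨p, hp, hDp⟩ := pvD_attained g (g.length : Int) ((g.headD []).length : Int) hne
      have hpw : pvCell1 g p.1 p.2 = false := by
        cases hcell : pvCell1 g p.1 p.2
        · rfl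
        · exfalso
          have := (pvDist_zero_iff g _ _ hne p hp).2 hcell
          omega
      refine (pvMem_waterVals g _ _ _).2 ⟨p, hp, hpw, ?_⟩
      rw [pvB_min g _ _ hne p, hDp]

-- ===== VERDICT (by name: the statement is the Claim_ definition above) =====
theorem maxDistance_reverted_spec : Claim_equal_maxDistance_reverted := by
  intro grid _ hpre
  exact (pvMain grid hpre : _)
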